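-- pv_equiv track=rewrite | github.com/JoshFrance476/TerrainSimulator | stage_3_generator.py | calculate_proximity_map
-- ===== SOURCE A (Python) =====
-- from collections import deque
--
-- def calculate_proximity_map(boolean_map):
--     rows, cols = len(boolean_map), len(boolean_map[0])
--
--     # Initialize the proximity map with a large value for unvisited cells
--     proximity_map = [[float('inf')] * cols for _ in range(rows)]
--
--     # Queue to store river cells (starting points for BFS)
--     queue = deque()
--
--     # Initialize the proximity map and queue with True positions
--     for r in range(rows):
--         for c in range(cols):
--             if boolean_map[r][c] == 1:
--                 proximity_map[r][c] = 0
--                 queue.append((r, c))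
--
--     # Directions for 4-way movement (up, down, left, right)
--     directions = [(-1, 0), (1, 0), (0, -1), (0, 1)]
--
--     # BFS to calculate shortest distance to True value
--     while queue:
--         r, c = queue.popleft()
--
--         for dr, dc in directions:
--             nr, nc = r + dr, c + dc
--
--             # Ensure within map bounds
--             if 0 <= nr < rows and 0 <= nc < cols:
--
--                 # If new distance is shorter, update and enqueue
--                 if proximity_map[nr][nc] > proximity_map[r][c] + 1:
--                     proximity_map[nr][nc] = proximity_map[r][c] + 1
--                     queue.append((nr, nc))
--
--     # Replace float('inf') with -1 for unreachable cells
--     for r in range(rows):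
--         for c in range(cols):
--             if proximity_map[r][c] == float('inf'):
--                 proximity_map[r][c] = -1
--
--     return proximity_map
-- ===== SOURCE B (Python) =====
-- def calculate_proximity_map(boolean_map):
--     rows, cols = len(boolean_map), len(boolean_map[0])
--     sources = [(r, c) for r in range(rows) for c in range(cols)
--                if boolean_map[r][c] == 1]
--     if not sources:
--         return [[-1] * cols for _ in range(rows)]
--     return [[min(abs(r - sr) + abs(c - sc) for sr, sc in sources)
--              for c in range(cols)] for r in range(rows)]
-- ===== Notes on version B (the rewrite author's own statement) =====
-- stated objective: simpler
-- what changed: Replaced the BFS/queue relaxation over the grid with a direct closed-form computation: collect the source cells once and take, for each cell, the minimum Manhattan distance to any source (exact because the grid is unobstructed), returning -1 when there are no sources.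
import Mathlib
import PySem

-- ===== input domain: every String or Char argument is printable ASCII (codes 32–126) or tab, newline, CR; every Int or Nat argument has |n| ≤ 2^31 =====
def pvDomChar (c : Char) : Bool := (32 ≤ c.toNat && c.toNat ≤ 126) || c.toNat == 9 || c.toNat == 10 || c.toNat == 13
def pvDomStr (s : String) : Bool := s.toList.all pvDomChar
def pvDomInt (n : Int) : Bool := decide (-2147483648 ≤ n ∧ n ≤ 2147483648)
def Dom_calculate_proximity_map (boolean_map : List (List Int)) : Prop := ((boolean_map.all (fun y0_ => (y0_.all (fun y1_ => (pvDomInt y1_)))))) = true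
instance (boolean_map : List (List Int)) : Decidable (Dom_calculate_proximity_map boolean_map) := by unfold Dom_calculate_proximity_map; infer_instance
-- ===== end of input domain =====

-- B replaces A's BFS queue relaxation by a direct minimum-of-Manhattan-distances computation
-- (exact on an unobstructed grid); objective: simpler.  Proved: both return the same grid on
-- every non-empty input whose rows are at least as long as the first row (elsewhere A raises).

-- ===== PORT A =====
def pvRows (bm : List (List Int)) : Nat := bm.length
def pvCols (bm : List (List Int)) : Nat := ((PySem.List.pyGet? bm 0).getD []).length

-- shared read helper: boolean_map[r][c] (both Pythons read cells exactly like this)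
def pvGet (bm : List (List Int)) (r c : Int) : Int :=
  (PySem.List.pyGet? ((PySem.List.pyGet? bm r).getD []) c).getD 0

-- row-major list of source cells (A builds its queue, B its source list, by this same scan)
def pvSources (bm : List (List Int)) (rows cols : Nat) : List (Int × Int) :=
  (List.range rows).flatMap (fun (r : Nat) =>
    (List.range cols).filterMap (fun (c : Nat) =>
      if pvGet bm ((r : Nat) : Int) ((c : Nat) : Int) = 1
      then some (((r : Nat) : Int), ((c : Nat) : Int)) else none))

-- Python `a > b` on values that are ints or float('inf') (none = inf)
def pvOGt : Option Nat → Option Nat → Bool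
  | none, none => false
  | none, some _ => true
  | some _, none => false
  | some a, some b => decide (b < a)

-- Python `v + 1` on int-or-inf
def pvOAdd1 : Option Nat → Option Nat
  | none => none
  | some v => some (v + 1)

-- proximity_map[r][c] = v  (the mutable 2-D array, modelled as a function)
def pvUpd (g : Int → Int → Option Nat) (r c : Int) (v : Option Nat) : Int → Int → Option Nat :=
  fun r' c' => if r' = r ∧ c' = c then v else g r' c'

-- body of `for dr, dc in directions: ...` for one direction
def pvTryDir (rows cols r c : Int)
    (st : (Int → Int → Option Nat) × List (Int × Int)) (d : Int × Int) :
    (Int → Int → Option Nat) × List (Int × Int) :=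
  let nr := r + d.1
  let nc := c + d.2
  if 0 ≤ nr ∧ nr < rows ∧ 0 ≤ nc ∧ nc < cols then
    if pvOGt (st.1 nr nc) (pvOAdd1 (st.1 r c)) then
      (pvUpd st.1 nr nc (pvOAdd1 (st.1 r c)), st.2 ++ [(nr, nc)])
    else st
  else st

-- `while queue:` — fuel makes the loop total; the proof shows the fuel A passes always suffices
def pvLoop (rows cols : Int) :
    Nat → (Int → Int → Option Nat) → List (Int × Int) → (Int → Int → Option Nat)
  | 0, g, _ => g
  | _ + 1, g, [] => g
  | fuel + 1, g, (r, c) :: rest =>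
      let st := [((-1 : Int), (0 : Int)), (1, 0), (0, -1), (0, 1)].foldl
        (pvTryDir rows cols r c) (g, [])
      pvLoop rows cols fuel st.1 (rest ++ st.2)

-- initial proximity map: 0 at sources, inf elsewhere
def pvG0 (bm : List (List Int)) : Int → Int → Option Nat :=
  fun r c => if pvGet bm r c = 1 then some 0 else none

def calculate_proximity_map (boolean_map : List (List Int)) : List (List Int) :=
  let rows := pvRows boolean_map
  let cols := pvCols boolean_map
  let q0 := pvSources boolean_map rows cols
  let fuel := 5 * (rows * cols) * (rows * cols) + rows * cols + 1
  let gF := pvLoop (rows : Int) (cols : Int) fuel (pvG0 boolean_map) q0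
  (List.range rows).map (fun (r : Nat) =>
    (List.range cols).map (fun (c : Nat) =>
      match gF ((r : Nat) : Int) ((c : Nat) : Int) with
      | none => (-1 : Int)
      | some v => (v : Int)))

-- ===== PORT B =====
def calculate_proximity_map_alt (boolean_map : List (List Int)) : List (List Int) :=
  let rows := pvRows boolean_map
  let cols := pvCols boolean_map
  let sources := pvSources boolean_map rows cols
  if sources.isEmpty then
    (List.range rows).map (fun (_ : Nat) => (List.range cols).map (fun (_ : Nat) => (-1 : Int)))
  else
    (List.range rows).map (fun (r : Nat) =>
      (List.range cols).map (fun (c : Nat) =>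
        (PySem.List.min?
          (sources.map (fun s => |((r : Nat) : Int) - s.1| + |((c : Nat) : Int) - s.2|))
          (fun x => x)).getD 0))

-- ===== PRECONDITION & SPEC =====
-- Pre_ excludes exactly the inputs on which Python A raises IndexError: the empty outer list
-- (boolean_map[0]) and maps with some row shorter than the first row (boolean_map[r][c], c < cols).
def Pre_calculate_proximity_map (boolean_map : List (List Int)) : Prop :=
  boolean_map ≠ [] ∧ ∀ row ∈ boolean_map, (boolean_map.headD []).length ≤ row.length
instance (boolean_map : List (List Int)) : Decidable (Pre_calculate_proximity_map boolean_map) := by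
  unfold Pre_calculate_proximity_map; infer_instance

def pvWitness_calculate_proximity_map : List (List Int) := [[0, 1], [0, 0]]

def Spec_calculate_proximity_map (boolean_map : List (List Int)) (out : List (List Int)) : Prop := out = calculate_proximity_map_alt boolean_map
instance (boolean_map : List (List Int)) (out : List (List Int)) : Decidable (Spec_calculate_proximity_map boolean_map out) := by unfold Spec_calculate_proximity_map; infer_instance

-- ===== CLAIM (what is proved, stated in full; the proofs are below) =====
def Claim_equal_calculate_proximity_map : Prop := ∀ (boolean_map : List (List Int)), Dom_calculate_proximity_map boolean_map → Pre_calculate_proximity_map boolean_map → Spec_calculate_proximity_map boolean_map (calculate_proximity_map boolean_map)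

-- ===== LEMMAS AND PROOFS =====

-- grid geometry
def pvInB (bm : List (List Int)) (x : Int × Int) : Prop :=
  0 ≤ x.1 ∧ x.1 < (pvRows bm : Int) ∧ 0 ≤ x.2 ∧ x.2 < (pvCols bm : Int)
def pvSrc (bm : List (List Int)) (x : Int × Int) : Prop :=
  pvInB bm x ∧ pvGet bm x.1 x.2 = 1
def mdist (x y : Int × Int) : Nat := (x.1 - y.1).natAbs + (x.2 - y.2).natAbs

-- order on int-or-inf values
def oLE : Option Nat → Option Nat → Prop
  | _, none => True
  | none, some _ => False
  | some a, some b => a ≤ b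

-- sums over the whole grid
def pvP (bm : List (List Int)) : Finset (Nat × Nat) :=
  (Finset.range (pvRows bm)) ×ˢ (Finset.range (pvCols bm))
def gridSum (bm : List (List Int)) (F : Option Nat → Nat) (g : Int → Int → Option Nat) : Nat :=
  (pvP bm).sum (fun p => F (g (p.1 : Int) (p.2 : Int)))
def pvNfin (bm : List (List Int)) (g : Int → Int → Option Nat) : Nat :=
  gridSum bm (fun o => if o.isSome then 1 else 0) g
def psiC (C : Nat) : Option Nat → Nat
  | none => C
  | some v => min v C
def pvPsi (bm : List (List Int)) (g : Int → Int → Option Nat) : Nat :=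
  gridSum bm (psiC (pvRows bm * pvCols bm)) g

-- invariants
def pvSound (bm : List (List Int)) (g : Int → Int → Option Nat) : Prop :=
  ∀ x : Int × Int, pvInB bm x → ∀ v, g x.1 x.2 = some v → ∃ s, pvSrc bm s ∧ mdist x s ≤ v
def pvZro (bm : List (List Int)) (g : Int → Int → Option Nat) : Prop :=
  ∀ x, pvSrc bm x → g x.1 x.2 = some 0
def pvCnt (bm : List (List Int)) (g : Int → Int → Option Nat) : Prop :=
  ∀ x, pvInB bm x → ∀ v, g x.1 x.2 = some v → v < pvNfin bm g
def pvQok (bm : List (List Int)) (g : Int → Int → Option Nat) (q : List (Int × Int)) : Prop :=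
  ∀ u ∈ q, pvInB bm u ∧ (g u.1 u.2).isSome
def pvEdgeQ (bm : List (List Int)) (g : Int → Int → Option Nat) (q : List (Int × Int)) : Prop :=
  ∀ u v, pvInB bm u → pvInB bm v → mdist u v = 1 →
    oLE (g v.1 v.2) (pvOAdd1 (g u.1 u.2)) ∨ u ∈ q
def pvInv (bm : List (List Int)) (g : Int → Int → Option Nat) (q : List (Int × Int)) : Prop :=
  pvEdgeQ bm g q ∧ pvSound bm g ∧ pvZro bm g ∧ pvCnt bm g ∧ pvQok bm g q
def pvRel (bm : List (List Int)) (g : Int → Int → Option Nat) : Prop :=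
  ∀ u v, pvInB bm u → pvInB bm v → mdist u v = 1 → oLE (g v.1 v.2) (pvOAdd1 (g u.1 u.2))
def pvDone (bm : List (List Int)) (g : Int → Int → Option Nat) : Prop :=
  pvRel bm g ∧ pvSound bm g ∧ pvZro bm g

-- mid-fold invariant while the four directions of popped cell x are processed
def pvMid (bm : List (List Int)) (x : Int × Int) (rest : List (Int × Int))
    (g : Int → Int → Option Nat) (ps ds : List (Int × Int)) : Prop :=
  pvSound bm g ∧ pvZro bm g ∧ pvCnt bm g ∧ pvQok bm g (rest ++ ps) ∧
  (∀ u v, pvInB bm u → pvInB bm v → mdist u v = 1 →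
    oLE (g v.1 v.2) (pvOAdd1 (g u.1 u.2)) ∨ u ∈ rest ++ ps ∨
      (u = x ∧ (v.1 - x.1, v.2 - x.2) ∈ ds))

-- ---- small facts about the value order ----
theorem oLE_none_right (a : Option Nat) : oLE a none := by cases a <;> simp [oLE]

theorem ogt_false_iff (a b : Option Nat) : pvOGt a b = false ↔ oLE a b := by
  cases a <;> cases b <;> simp [pvOGt, oLE]

theorem oLE_trans {a b c : Option Nat} (h1 : oLE a b) (h2 : oLE b c) : oLE a c := by
  cases a <;> cases b <;> cases c <;> simp_all [oLE]
  omega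

theorem oadd1_mono {a b : Option Nat} (h : oLE a b) : oLE (pvOAdd1 a) (pvOAdd1 b) := by
  cases a <;> cases b <;> simp_all [oLE, pvOAdd1]

-- ---- gridSum machinery ----
theorem pvInB_mem (bm : List (List Int)) (v0 : Int × Int) (h : pvInB bm v0) :
    (v0.1.toNat, v0.2.toNat) ∈ pvP bm ∧ ((v0.1.toNat : Int), (v0.2.toNat : Int)) = v0 := by
  obtain ⟨h1, h2, h3, h4⟩ := h
  constructor
  · simp [pvP, Finset.mem_product]; omega
  · ext <;> simp <;> omega

theorem gridSum_split (bm : List (List Int)) (F : Option Nat → Nat)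
    (g : Int → Int → Option Nat) (v0 : Int × Int) (h : pvInB bm v0) :
    gridSum bm F g
      = ((pvP bm).erase (v0.1.toNat, v0.2.toNat)).sum (fun p => F (g (p.1 : Int) (p.2 : Int)))
        + F (g v0.1 v0.2) := by
  obtain ⟨hm, hc⟩ := pvInB_mem bm v0 h
  rw [gridSum, ← Finset.sum_erase_add _ _ hm]
  have h1 : ((v0.1.toNat : Nat) : Int) = v0.1 := congrArg Prod.fst hc
  have h2 : ((v0.2.toNat : Nat) : Int) = v0.2 := congrArg Prod.snd hc
  simp [h1, h2]

theorem gridSum_upd (bm : List (List Int)) (F : Option Nat → Nat)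
    (g : Int → Int → Option Nat) (v0 : Int × Int) (h : pvInB bm v0) (w : Option Nat) :
    gridSum bm F (pvUpd g v0.1 v0.2 w) + F (g v0.1 v0.2) = gridSum bm F g + F w := by
  obtain ⟨hm, hc⟩ := pvInB_mem bm v0 h
  have h1 : ((v0.1.toNat : Nat) : Int) = v0.1 := congrArg Prod.fst hc
  have h2 : ((v0.2.toNat : Nat) : Int) = v0.2 := congrArg Prod.snd hc
  rw [gridSum_split bm F (pvUpd g v0.1 v0.2 w) v0 h, gridSum_split bm F g v0 h]
  have hsame : ∀ p ∈ (pvP bm).erase (v0.1.toNat, v0.2.toNat),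
      F (pvUpd g v0.1 v0.2 w (p.1 : Int) (p.2 : Int)) = F (g (p.1 : Int) (p.2 : Int)) := by
    intro p hp
    have hne : p ≠ (v0.1.toNat, v0.2.toNat) := Finset.ne_of_mem_erase hp
    have : ¬ ((p.1 : Int) = v0.1 ∧ (p.2 : Int) = v0.2) := by
      rintro ⟨e1, e2⟩
      apply hne
      ext
      · omega
      · omega
    simp [pvUpd, this]
  rw [Finset.sum_congr rfl hsame]
  have hupd : pvUpd g v0.1 v0.2 w v0.1 v0.2 = w := by simp [pvUpd]
  rw [hupd]
  omega

theorem gridSum_le (bm : List (List Int)) (F : Option Nat → Nat) (B : Nat)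
    (g : Int → Int → Option Nat) (h : ∀ o, F o ≤ B) :
    gridSum bm F g ≤ pvRows bm * pvCols bm * B := by
  calc gridSum bm F g ≤ (pvP bm).sum (fun _ => B) := Finset.sum_le_sum (fun p _ => h _)
    _ = pvRows bm * pvCols bm * B := by simp [pvP, Finset.sum_const, mul_assoc]

theorem gridSum_erase_le (bm : List (List Int)) (F : Option Nat → Nat) (B : Nat)
    (g : Int → Int → Option Nat) (v0 : Int × Int) (h0 : pvInB bm v0) (h : ∀ o, F o ≤ B) :
    ((pvP bm).erase (v0.1.toNat, v0.2.toNat)).sum (fun p => F (g (p.1 : Int) (p.2 : Int)))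
      ≤ (pvRows bm * pvCols bm - 1) * B := by
  obtain ⟨hm, _⟩ := pvInB_mem bm v0 h0
  calc ((pvP bm).erase (v0.1.toNat, v0.2.toNat)).sum (fun p => F (g (p.1 : Int) (p.2 : Int)))
      ≤ ((pvP bm).erase (v0.1.toNat, v0.2.toNat)).sum (fun _ => B) :=
        Finset.sum_le_sum (fun p _ => h _)
    _ = ((pvP bm).card - 1) * B := by rw [Finset.sum_const, Finset.card_erase_of_mem hm]; ring
    _ = (pvRows bm * pvCols bm - 1) * B := by simp [pvP]


-- ---- one direction of the popped cell x ----
theorem pvMid_step (bm : List (List Int)) (x : Int × Int) (rest : List (Int × Int))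
    (g : Int → Int → Option Nat) (ps : List (Int × Int)) (d : Int × Int)
    (ds' : List (Int × Int))
    (hadj : mdist (x.1 + d.1, x.2 + d.2) x = 1)
    (hx : pvInB bm x) (_hxs : (g x.1 x.2).isSome)
    (hmid : pvMid bm x rest g ps (d :: ds')) :
    pvMid bm x rest (pvTryDir (pvRows bm) (pvCols bm) x.1 x.2 (g, ps) d).1
        (pvTryDir (pvRows bm) (pvCols bm) x.1 x.2 (g, ps) d).2 ds' ∧
    (pvTryDir (pvRows bm) (pvCols bm) x.1 x.2 (g, ps) d).1 x.1 x.2 = g x.1 x.2 ∧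
    pvPsi bm (pvTryDir (pvRows bm) (pvCols bm) x.1 x.2 (g, ps) d).1
        + (pvTryDir (pvRows bm) (pvCols bm) x.1 x.2 (g, ps) d).2.length
      ≤ pvPsi bm g + ps.length := by
  obtain ⟨hS, hZ, hC, hQ, hE⟩ := hmid
  simp only [pvTryDir]
  by_cases hb : 0 ≤ x.1 + d.1 ∧ x.1 + d.1 < (pvRows bm : Int) ∧
      0 ≤ x.2 + d.2 ∧ x.2 + d.2 < (pvCols bm : Int)
  · rw [if_pos hb]
    have hyB : pvInB bm (x.1 + d.1, x.2 + d.2) := hb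
    by_cases hup : pvOGt (g (x.1 + d.1) (x.2 + d.2)) (pvOAdd1 (g x.1 x.2)) = true
    · rw [if_pos hup]
      simp only []
      -- the update case
      obtain ⟨p, hp⟩ : ∃ p, g x.1 x.2 = some p := by
        cases hgx : g x.1 x.2 with
        | none => rw [hgx] at hup; cases hgy : g (x.1 + d.1) (x.2 + d.2) <;>
            simp [pvOAdd1, pvOGt, hgy] at hup
        | some p => exact ⟨p, rfl⟩
      rw [hp]
      have hne : ¬ (x.1 = x.1 + d.1 ∧ x.2 = x.2 + d.2) := by
        simp only [mdist] at hadj; omega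
      have hGt : pvOGt (g (x.1 + d.1) (x.2 + d.2)) (some (p + 1)) = true := by
        rw [hp] at hup; exact hup
      have hlt : ∀ q, g (x.1 + d.1) (x.2 + d.2) = some q → p + 1 < q := by
        intro q hq; rw [hq] at hGt; simpa [pvOGt] using hGt
      set g' := pvUpd g (x.1 + d.1) (x.2 + d.2) (pvOAdd1 (some p)) with hg'
      have hEval : ∀ a b : Int, g' a b =
          if a = x.1 + d.1 ∧ b = x.2 + d.2 then some (p + 1) else g a b := by
        intro a b; simp [hg', pvUpd, pvOAdd1]
      have hgx' : g' x.1 x.2 = g x.1 x.2 := by rw [hEval, if_neg hne]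
      have hgy' : g' (x.1 + d.1) (x.2 + d.2) = some (p + 1) := by
        rw [hEval, if_pos ⟨rfl, rfl⟩]
      have hother : ∀ z : Int × Int, ¬ (z.1 = x.1 + d.1 ∧ z.2 = x.2 + d.2) →
          g' z.1 z.2 = g z.1 z.2 := by intro z hz; rw [hEval, if_neg hz]
      have hdec : oLE (g' (x.1 + d.1) (x.2 + d.2)) (g (x.1 + d.1) (x.2 + d.2)) := by
        rw [hgy']; cases hgy : g (x.1 + d.1) (x.2 + d.2) with
        | none => exact oLE_none_right _
        | some q => exact Nat.le_of_lt (hlt q hgy)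
      have hCbound : pvNfin bm g ≤ pvRows bm * pvCols bm := by
        have := gridSum_le bm (fun o => if o.isSome then 1 else 0) 1 g
          (by intro o; cases o <;> simp)
        simpa [pvNfin] using this
      have hNfin : pvNfin bm g' + (if (g (x.1 + d.1) (x.2 + d.2)).isSome then 1 else 0)
          = pvNfin bm g + 1 := by
        have := gridSum_upd bm (fun o => if o.isSome then 1 else 0) g
          (x.1 + d.1, x.2 + d.2) hyB (pvOAdd1 (some p))
        simpa [pvNfin, hg', pvOAdd1] using this
      -- soundness at the new cell
      obtain ⟨s0, hs0, hd0⟩ := hS x hx p hp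
      have htri : mdist (x.1 + d.1, x.2 + d.2) s0 ≤ p + 1 := by
        have : mdist (x.1 + d.1, x.2 + d.2) s0 ≤
            mdist (x.1 + d.1, x.2 + d.2) x + mdist x s0 := by
          simp only [mdist]; omega
        simp only [hadj] at this; omega
      refine ⟨⟨?_, ?_, ?_, ?_, ?_⟩, hgx'.trans hp, ?_⟩
      · -- Sound
        intro z hz v hv
        by_cases hzy : z.1 = x.1 + d.1 ∧ z.2 = x.2 + d.2
        · have : g' z.1 z.2 = some (p + 1) := by rw [hEval, if_pos hzy]
          rw [this] at hv
          obtain rfl : p + 1 = v := by injection hv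
          refine ⟨s0, hs0, ?_⟩
          have : mdist z s0 = mdist (x.1 + d.1, x.2 + d.2) s0 := by
            obtain ⟨e1, e2⟩ := hzy; simp only [mdist, e1, e2]
          omega
        · rw [hother z hzy] at hv; exact hS z hz v hv
      · -- Zro
        intro z hz
        by_cases hzy : z.1 = x.1 + d.1 ∧ z.2 = x.2 + d.2
        · exfalso
          have h0 : g z.1 z.2 = some 0 := hZ z hz
          obtain ⟨e1, e2⟩ := hzy
          rw [e1, e2] at h0
          have := hlt 0 h0; omega
        · rw [hother z hzy]; exact hZ z hz
      · -- Cnt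
        intro z hz v hv
        cases hgy : g (x.1 + d.1) (x.2 + d.2) with
        | none =>
          rw [hgy] at hNfin
          simp only [Option.isSome_none, Bool.false_eq_true, ite_false] at hNfin
          have hN' : pvNfin bm g' = pvNfin bm g + 1 := by omega
          by_cases hzy : z.1 = x.1 + d.1 ∧ z.2 = x.2 + d.2
          · have : g' z.1 z.2 = some (p + 1) := by rw [hEval, if_pos hzy]
            rw [this] at hv
            obtain rfl : p + 1 = v := by injection hv
            have := hC x hx p hp; omega
          · rw [hother z hzy] at hv
            have := hC z hz v hv; omega
        | some q =>
          rw [hgy] at hNfin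
          simp only [Option.isSome_some, ite_true] at hNfin
          have hN' : pvNfin bm g' = pvNfin bm g := by omega
          by_cases hzy : z.1 = x.1 + d.1 ∧ z.2 = x.2 + d.2
          · have : g' z.1 z.2 = some (p + 1) := by rw [hEval, if_pos hzy]
            rw [this] at hv
            obtain rfl : p + 1 = v := by injection hv
            have hq := hC (x.1 + d.1, x.2 + d.2) hyB q hgy
            have := hlt q hgy; omega
          · rw [hother z hzy] at hv
            have := hC z hz v hv; omega
      · -- Qok
        intro u hu
        rw [← List.append_assoc] at hu
        rcases List.mem_append.mp hu with hu' | hu'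
        · obtain ⟨hu1, hu2⟩ := hQ u hu'
          refine ⟨hu1, ?_⟩
          by_cases hzy : u.1 = x.1 + d.1 ∧ u.2 = x.2 + d.2
          · rw [hEval, if_pos hzy]; simp
          · rw [hother u hzy]; exact hu2
        · obtain rfl : u = (x.1 + d.1, x.2 + d.2) := by simpa using hu'
          exact ⟨hyB, by rw [hgy']; simp⟩
      · -- edge invariant
        intro u v hu hv hd
        by_cases huy : u.1 = x.1 + d.1 ∧ u.2 = x.2 + d.2
        · refine Or.inr (Or.inl ?_)
          have hu' : u = (x.1 + d.1, x.2 + d.2) := by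
            ext
            · exact huy.1
            · exact huy.2
          rw [hu']
          simp
        · have hgu : g' u.1 u.2 = g u.1 u.2 := hother u huy
          rcases hE u v hu hv hd with hrel | hmem | ⟨hux, hdir⟩
          · left
            rw [hgu]
            by_cases hvy : v.1 = x.1 + d.1 ∧ v.2 = x.2 + d.2
            · have : g' v.1 v.2 = g' (x.1 + d.1) (x.2 + d.2) := by
                rw [hvy.1, hvy.2]
              rw [this]
              have : oLE (g' (x.1 + d.1) (x.2 + d.2)) (g v.1 v.2) := by
                rw [hvy.1, hvy.2]; exact hdec
              exact oLE_trans this hrel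
            · rw [hother v hvy]; exact hrel
          · right; left
            rw [← List.append_assoc]
            exact List.mem_append.mpr (Or.inl hmem)
          · rcases List.mem_cons.mp hdir with hdd | hdd
            · -- this is exactly the direction just processed: v = x + d, now relaxed
              left
              have hv1 : v.1 = x.1 + d.1 := by
                have := congrArg Prod.fst hdd; simp only at this
                omega
              have hv2 : v.2 = x.2 + d.2 := by
                have := congrArg Prod.snd hdd; simp only at this
                omega
              have hgv : g' v.1 v.2 = some (p + 1) := by rw [hEval, if_pos ⟨hv1, hv2⟩]
              rw [hgv, hgu, hux, hp]
              simp [pvOAdd1, oLE]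
            · right; right; exact ⟨hux, hdd⟩
      · -- potential decreases by at least the one push
        have hPsi : pvPsi bm g' + psiC (pvRows bm * pvCols bm) (g (x.1 + d.1) (x.2 + d.2))
            = pvPsi bm g + psiC (pvRows bm * pvCols bm) (some (p + 1)) := by
          have := gridSum_upd bm (psiC (pvRows bm * pvCols bm)) g
            (x.1 + d.1, x.2 + d.2) hyB (pvOAdd1 (some p))
          simpa [pvPsi, hg', pvOAdd1] using this
        have hstr : psiC (pvRows bm * pvCols bm) (some (p + 1)) <
            psiC (pvRows bm * pvCols bm) (g (x.1 + d.1) (x.2 + d.2)) := by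
          cases hgy : g (x.1 + d.1) (x.2 + d.2) with
          | none =>
            -- p < |finite cells| ≤ R*C - 1 since the target cell is not finite
            have hsplit := gridSum_split bm (fun o => if o.isSome then 1 else 0) g
              (x.1 + d.1, x.2 + d.2) hyB
            have herase := gridSum_erase_le bm (fun o => if o.isSome then 1 else 0) 1 g
              (x.1 + d.1, x.2 + d.2) hyB (by intro o; cases o <;> simp)
            rw [hgy] at hsplit
            simp only [Option.isSome_none] at hsplit
            have hpN := hC x hx p hp
            have : pvNfin bm g ≤ pvRows bm * pvCols bm - 1 := by
              rw [pvNfin, hsplit]; simpa using herase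
            have hRC1 : 1 ≤ pvRows bm * pvCols bm := by
              have := hpN; omega
            simp only [psiC]; omega
          | some q =>
            have hq := hC (x.1 + d.1, x.2 + d.2) hyB q hgy
            have := hlt q hgy
            simp only [psiC]; omega
        simp only [List.length_append, List.length_singleton]
        have : pvPsi bm g' < pvPsi bm g := by omega
        omega
    · rw [if_neg hup]
      simp only []
      have hrel : oLE (g (x.1 + d.1) (x.2 + d.2)) (pvOAdd1 (g x.1 x.2)) :=
        (ogt_false_iff _ _).mp (by simpa using hup)
      refine ⟨⟨hS, hZ, hC, hQ, ?_⟩, by simp, by simp⟩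
      intro u v hu hv hd
      rcases hE u v hu hv hd with h | h | ⟨hux, hdir⟩
      · exact Or.inl h
      · exact Or.inr (Or.inl h)
      · rcases List.mem_cons.mp hdir with hdd | hdd
        · left
          have hv1 : v.1 = x.1 + d.1 := by
            have := congrArg Prod.fst hdd; simp only at this
            omega
          have hv2 : v.2 = x.2 + d.2 := by
            have := congrArg Prod.snd hdd; simp only at this
            omega
          rw [hv1, hv2, hux]; exact hrel
        · exact Or.inr (Or.inr ⟨hux, hdd⟩)
  · rw [if_neg hb]
    simp only []
    refine ⟨⟨hS, hZ, hC, hQ, ?_⟩, by simp, by simp⟩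
    intro u v hu hv hd
    rcases hE u v hu hv hd with h | h | ⟨hux, hdir⟩
    · exact Or.inl h
    · exact Or.inr (Or.inl h)
    · rcases List.mem_cons.mp hdir with hdd | hdd
      · exfalso
        have hv1 : v.1 = x.1 + d.1 := by
          have := congrArg Prod.fst hdd; simp at this; omega
        have hv2 : v.2 = x.2 + d.2 := by
          have := congrArg Prod.snd hdd; simp at this; omega
        obtain ⟨a1, a2, a3, a4⟩ := hv
        rw [hv1] at a1 a2; rw [hv2] at a3 a4
        exact hb ⟨a1, a2, a3, a4⟩
      · exact Or.inr (Or.inr ⟨hux, hdd⟩)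


-- ---- all four directions by induction over the direction list ----
theorem pvFold_inv (bm : List (List Int)) (x : Int × Int) (rest : List (Int × Int)) :
    ∀ (ds : List (Int × Int)) (g : Int → Int → Option Nat) (ps : List (Int × Int)),
    (∀ d ∈ ds, mdist (x.1 + d.1, x.2 + d.2) x = 1) →
    pvInB bm x → (g x.1 x.2).isSome →
    pvMid bm x rest g ps ds →
    pvMid bm x rest (ds.foldl (pvTryDir (pvRows bm) (pvCols bm) x.1 x.2) (g, ps)).1
        (ds.foldl (pvTryDir (pvRows bm) (pvCols bm) x.1 x.2) (g, ps)).2 [] ∧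
    pvPsi bm (ds.foldl (pvTryDir (pvRows bm) (pvCols bm) x.1 x.2) (g, ps)).1
        + (ds.foldl (pvTryDir (pvRows bm) (pvCols bm) x.1 x.2) (g, ps)).2.length
      ≤ pvPsi bm g + ps.length := by
  intro ds
  induction ds with
  | nil => intro g ps _ _ _ hmid; exact ⟨hmid, Nat.le_refl _⟩
  | cons d ds' ih =>
    intro g ps hds hx hxs hmid
    have hstep := pvMid_step bm x rest g ps d ds' (hds d (by simp)) hx hxs hmid
    obtain ⟨hmid', hgx, hpsi⟩ := hstep
    have hrec := ih (pvTryDir (pvRows bm) (pvCols bm) x.1 x.2 (g, ps) d).1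
      (pvTryDir (pvRows bm) (pvCols bm) x.1 x.2 (g, ps) d).2
      (fun e he => hds e (by simp [he])) hx (by rw [hgx]; exact hxs) hmid'
    rw [List.foldl_cons]
    refine ⟨?_, ?_⟩
    · have := hrec.1
      simpa using this
    · calc pvPsi bm ((ds'.foldl (pvTryDir (pvRows bm) (pvCols bm) x.1 x.2)
            (pvTryDir (pvRows bm) (pvCols bm) x.1 x.2 (g, ps) d))).1
          + ((ds'.foldl (pvTryDir (pvRows bm) (pvCols bm) x.1 x.2)
            (pvTryDir (pvRows bm) (pvCols bm) x.1 x.2 (g, ps) d))).2.length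
          ≤ pvPsi bm (pvTryDir (pvRows bm) (pvCols bm) x.1 x.2 (g, ps) d).1
            + (pvTryDir (pvRows bm) (pvCols bm) x.1 x.2 (g, ps) d).2.length := by
            have := hrec.2; simpa using this
        _ ≤ pvPsi bm g + ps.length := hpsi

-- ---- one iteration of `while queue` ----
theorem pvStep_inv (bm : List (List Int)) (x : Int × Int) (rest : List (Int × Int))
    (g : Int → Int → Option Nat) (hinv : pvInv bm g (x :: rest)) :
    pvInv bm
      ([((-1 : Int), (0 : Int)), (1, 0), (0, -1), (0, 1)].foldl
        (pvTryDir (pvRows bm) (pvCols bm) x.1 x.2) (g, [])).1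
      (rest ++
        ([((-1 : Int), (0 : Int)), (1, 0), (0, -1), (0, 1)].foldl
          (pvTryDir (pvRows bm) (pvCols bm) x.1 x.2) (g, [])).2) ∧
    5 * pvPsi bm
        ([((-1 : Int), (0 : Int)), (1, 0), (0, -1), (0, 1)].foldl
          (pvTryDir (pvRows bm) (pvCols bm) x.1 x.2) (g, [])).1
      + (rest ++
          ([((-1 : Int), (0 : Int)), (1, 0), (0, -1), (0, 1)].foldl
            (pvTryDir (pvRows bm) (pvCols bm) x.1 x.2) (g, [])).2).length
      < 5 * pvPsi bm g + (x :: rest).length := by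
  obtain ⟨hE, hS, hZ, hC, hQ⟩ := hinv
  obtain ⟨hxB, hxs⟩ := hQ x (by simp)
  have hds : ∀ d ∈ [((-1 : Int), (0 : Int)), (1, 0), (0, -1), (0, 1)],
      mdist (x.1 + d.1, x.2 + d.2) x = 1 := by
    intro d hd
    rcases (by simpa using hd : d = (-1, 0) ∨ d = (1, 0) ∨ d = (0, -1) ∨ d = (0, 1))
      with rfl | rfl | rfl | rfl <;> (simp only [mdist]; omega)
  have hmid0 : pvMid bm x rest g [] [((-1 : Int), (0 : Int)), (1, 0), (0, -1), (0, 1)] := by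
    refine ⟨hS, hZ, hC, ?_, ?_⟩
    · intro u hu
      exact hQ u (by simp only [List.append_nil] at hu; simp [hu])
    · intro u v hu hv hd
      rcases hE u v hu hv hd with h | h
      · exact Or.inl h
      · rcases List.mem_cons.mp h with h'' | h'
        · right; right
          refine ⟨h'', ?_⟩
          rw [← h'']
          have hcases : (v.1 - u.1 = -1 ∧ v.2 - u.2 = 0) ∨ (v.1 - u.1 = 1 ∧ v.2 - u.2 = 0) ∨
              (v.1 - u.1 = 0 ∧ v.2 - u.2 = -1) ∨ (v.1 - u.1 = 0 ∧ v.2 - u.2 = 1) := by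
            simp only [mdist] at hd; omega
          rcases hcases with ⟨e1, e2⟩ | ⟨e1, e2⟩ | ⟨e1, e2⟩ | ⟨e1, e2⟩ <;>
            simp [Prod.ext_iff, e1, e2]
        · exact Or.inr (Or.inl (by simp [h']))
  have hfold := pvFold_inv bm x rest [((-1 : Int), (0 : Int)), (1, 0), (0, -1), (0, 1)]
    g [] hds hxB hxs hmid0
  obtain ⟨⟨fS, fZ, fC, fQ, fE⟩, fPsi⟩ := hfold
  constructor
  · refine ⟨?_, fS, fZ, fC, fQ⟩
    intro u v hu hv hd
    rcases fE u v hu hv hd with h | h | h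
    · exact Or.inl h
    · exact Or.inr h
    · exact absurd h.2 (by simp)
  · simp only [List.length_append, List.length_cons, List.length_nil] at *
    omega

-- ---- the whole loop, by induction on the fuel ----
theorem pvLoop_done (bm : List (List Int)) :
    ∀ (fuel : Nat) (g : Int → Int → Option Nat) (q : List (Int × Int)),
    pvInv bm g q → 5 * pvPsi bm g + q.length < fuel →
    pvDone bm (pvLoop (pvRows bm) (pvCols bm) fuel g q) := by
  intro fuel
  induction fuel with
  | zero => intro g q _ h; omega
  | succ n ih =>
    intro g q hinv hfuel
    cases q with
    | nil =>
      obtain ⟨hE, hS, hZ, _, _⟩ := hinv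
      refine ⟨?_, hS, hZ⟩
      intro u v hu hv hd
      rcases hE u v hu hv hd with h | h
      · exact h
      · exact absurd h (by simp)
    | cons x rest =>
      obtain ⟨r, c⟩ := x
      have hstep := pvStep_inv bm (r, c) rest g hinv
      show pvDone bm (pvLoop (pvRows bm) (pvCols bm) (n + 1) g ((r, c) :: rest))
      rw [pvLoop]
      exact ih _ _ hstep.1 (by have := hstep.2; simp only [List.length_cons] at *; omega)


-- ---- the initial state satisfies the invariant ----
theorem mem_pvSources (bm : List (List Int)) (u : Int × Int) :
    u ∈ pvSources bm (pvRows bm) (pvCols bm) ↔ pvSrc bm u := by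
  simp only [pvSources, List.mem_flatMap, List.mem_filterMap, List.mem_range,
    Option.ite_none_right_eq_some, Option.some.injEq]
  constructor
  · rintro ⟨r, hr, c, hc, h1, rfl⟩
    exact ⟨by simp [pvInB]; omega, h1⟩
  · rintro ⟨⟨h1, h2, h3, h4⟩, h5⟩
    refine ⟨u.1.toNat, by omega, u.2.toNat, by omega, ?_, ?_⟩
    · have e1 : ((u.1.toNat : Nat) : Int) = u.1 := by omega
      have e2 : ((u.2.toNat : Nat) : Int) = u.2 := by omega
      rw [e1, e2]; exact h5
    · ext
      · simp; omega
      · simp; omega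

theorem pvInv_init (bm : List (List Int)) :
    pvInv bm (pvG0 bm) (pvSources bm (pvRows bm) (pvCols bm)) := by
  refine ⟨?_, ?_, ?_, ?_, ?_⟩
  · intro u v hu hv hd
    cases hg : pvG0 bm u.1 u.2 with
    | none => left; simp only [pvOAdd1]; exact oLE_none_right _
    | some p =>
      right
      rw [mem_pvSources]
      refine ⟨hu, ?_⟩
      by_contra h1
      simp [pvG0, h1] at hg
  · intro x hx v hv
    by_cases h1 : pvGet bm x.1 x.2 = 1
    · exact ⟨x, ⟨hx, h1⟩, by simp [mdist]⟩
    · simp [pvG0, h1] at hv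
  · intro x hx
    simp [pvG0, hx.2]
  · intro x hx v hv
    by_cases h1 : pvGet bm x.1 x.2 = 1
    · have hsplit := gridSum_split bm (fun o => if o.isSome then 1 else 0) (pvG0 bm) x hx
      rw [hv] at hsplit
      simp only [Option.isSome_some, ite_true] at hsplit
      simp [pvG0, h1] at hv
      rw [pvNfin, hsplit]
      omega
    · simp [pvG0, h1] at hv
  · intro u hu
    have := (mem_pvSources bm u).mp hu
    exact ⟨this.1, by simp [pvG0, this.2]⟩

theorem len_flatMap_le {a b : Type} (l : List a) (f : a → List b) (n : Nat)
    (h : ∀ x, (f x).length ≤ n) : (l.flatMap f).length ≤ l.length * n := by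
  induction l with
  | nil => simp
  | cons x t ih =>
    simp only [List.flatMap_cons, List.length_append, List.length_cons]
    have := h x
    calc (f x).length + (t.flatMap f).length ≤ n + t.length * n := by omega
      _ = (t.length + 1) * n := by ring

theorem len_pvSources (bm : List (List Int)) :
    (pvSources bm (pvRows bm) (pvCols bm)).length ≤ pvRows bm * pvCols bm := by
  rw [pvSources]
  calc _ ≤ (List.range (pvRows bm)).length * pvCols bm := by
        apply len_flatMap_le
        intro r
        calc _ ≤ (List.range (pvCols bm)).length := List.length_filterMap_le _ _
          _ = pvCols bm := List.length_range
    _ = pvRows bm * pvCols bm := by simp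

theorem pvPsi_le (bm : List (List Int)) (g : Int → Int → Option Nat) :
    pvPsi bm g ≤ pvRows bm * pvCols bm * (pvRows bm * pvCols bm) := by
  refine gridSum_le bm _ _ g ?_
  intro o
  cases o with
  | none => exact Nat.le_refl _
  | some v => exact Nat.min_le_right _ _

-- ---- after termination the grid is exactly the Manhattan distance to the sources ----
theorem oLE_step {a : Option Nat} {n : Nat} (h : oLE a (some n)) : oLE a (some (n + 1)) := by
  cases a with
  | none => simp [oLE] at h
  | some v => simp only [oLE] at *; omega

theorem pvUpper (bm : List (List Int)) (g : Int → Int → Option Nat) (hD : pvDone bm g) :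
    ∀ (n : Nat) (x s : Int × Int), pvInB bm x → pvSrc bm s → mdist x s ≤ n →
      oLE (g x.1 x.2) (some n) := by
  intro n
  induction n with
  | zero =>
    intro x s hx hs hm
    have hxs : x = s := by
      have := hm
      simp only [mdist] at this
      ext
      · omega
      · omega
    rw [hxs, hD.2.2 s hs]
    simp [oLE]
  | succ n ih =>
    intro x s hx hs hm
    by_cases hle : mdist x s ≤ n
    · exact oLE_step (ih x s hx hs hle)
    · have hmd : mdist x s = n + 1 := by omega
      have hsB : pvInB bm s := hs.1
      -- one step from x towards s
      have hy : ∃ y : Int × Int, pvInB bm y ∧ mdist y s = n ∧ mdist y x = 1 := by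
        by_cases h1 : x.1 < s.1
        · refine ⟨(x.1 + 1, x.2), ?_, ?_, ?_⟩ <;>
            (simp only [pvInB, mdist] at *; omega)
        · by_cases h2 : s.1 < x.1
          · refine ⟨(x.1 - 1, x.2), ?_, ?_, ?_⟩ <;>
              (simp only [pvInB, mdist] at *; omega)
          · by_cases h3 : x.2 < s.2
            · refine ⟨(x.1, x.2 + 1), ?_, ?_, ?_⟩ <;>
                (simp only [pvInB, mdist] at *; omega)
            · refine ⟨(x.1, x.2 - 1), ?_, ?_, ?_⟩ <;>
                (simp only [pvInB, mdist] at *; omega)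
      obtain ⟨y, hyB, hys, hyx⟩ := hy
      have hIH : oLE (g y.1 y.2) (some n) := ih y s hyB hs (by omega)
      have hedge : oLE (g x.1 x.2) (pvOAdd1 (g y.1 y.2)) := hD.1 y x hyB hx hyx
      have := oadd1_mono hIH
      simp only [pvOAdd1] at this
      exact oLE_trans hedge this

theorem pvNoSource (bm : List (List Int)) (g : Int → Int → Option Nat)
    (hS : pvSound bm g) (hs : pvSources bm (pvRows bm) (pvCols bm) = [])
    (x : Int × Int) (hx : pvInB bm x) : g x.1 x.2 = none := by
  cases hg : g x.1 x.2 with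
  | none => rfl
  | some v =>
    obtain ⟨s, hsrc, _⟩ := hS x hx v hg
    have : s ∈ pvSources bm (pvRows bm) (pvCols bm) := (mem_pvSources bm s).mpr hsrc
    rw [hs] at this
    simp at this

theorem pvAbsEq (r c : Nat) (s : Int × Int) :
    |(r : Int) - s.1| + |(c : Int) - s.2| = ((mdist ((r : Int), (c : Int)) s : Nat) : Int) := by
  simp only [mdist]
  push_cast
  rw [Int.abs_eq_natAbs, Int.abs_eq_natAbs]

theorem pvEntry (bm : List (List Int)) (g : Int → Int → Option Nat) (hD : pvDone bm g)
    (hne : pvSources bm (pvRows bm) (pvCols bm) ≠ []) (r c : Nat)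
    (hr : r < pvRows bm) (hc : c < pvCols bm) :
    (match g (r : Int) (c : Int) with
      | none => (-1 : Int)
      | some v => (v : Int))
    = (PySem.List.min?
        ((pvSources bm (pvRows bm) (pvCols bm)).map
          (fun s => |(r : Int) - s.1| + |(c : Int) - s.2|)) (fun x => x)).getD 0 := by
  have hxB : pvInB bm ((r : Int), (c : Int)) := by simp only [pvInB]; constructor <;> omega
  obtain ⟨s0, hs0⟩ := List.exists_mem_of_ne_nil _ hne
  have hsrc0 : pvSrc bm s0 := (mem_pvSources bm s0).mp hs0
  have hup : ∀ s, pvSrc bm s → oLE (g (r : Int) (c : Int)) (some (mdist ((r : Int), (c : Int)) s)) :=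
    fun s hs => pvUpper bm g hD (mdist ((r : Int), (c : Int)) s) _ s hxB hs (Nat.le_refl _)
  cases hg : g (r : Int) (c : Int) with
  | none => exact absurd (hg ▸ hup s0 hsrc0) (by simp [oLE])
  | some v =>
    obtain ⟨s2, hs2, hd2⟩ := hD.2.1 ((r : Int), (c : Int)) hxB v hg
    cases hm : PySem.List.min?
        ((pvSources bm (pvRows bm) (pvCols bm)).map
          (fun s => |(r : Int) - s.1| + |(c : Int) - s.2|)) (fun x => x) with
    | none =>
      rw [PySem.List.min?_eq_none_iff] at hm
      exact absurd (List.map_eq_nil_iff.mp hm) hne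
    | some m =>
      have hmem := PySem.List.min?_mem hm
      obtain ⟨s1, hs1, hm1⟩ := List.mem_map.mp hmem
      simp only [Option.getD_some]
      -- v ≤ mdist x s1  and  m ≤ every mapped value, in particular the one at s2
      have hv1 : (v : Int) ≤ (mdist ((r : Int), (c : Int)) s1 : Nat) := by
        have := hup s1 ((mem_pvSources bm s1).mp hs1)
        rw [hg] at this
        simp only [oLE] at this
        exact_mod_cast this
      have hm2 : m ≤ |(r : Int) - s2.1| + |(c : Int) - s2.2| := by
        have := PySem.List.min?_isMin hm (|(r : Int) - s2.1| + |(c : Int) - s2.2|)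
          (List.mem_map.mpr ⟨s2, (mem_pvSources bm s2).mpr hs2, rfl⟩)
        simpa using this
      rw [pvAbsEq] at hm1 hm2
      have hc2 : ((mdist ((r : Int), (c : Int)) s2 : Nat) : Int) ≤ (v : Int) := by exact_mod_cast hd2
      omega

-- ===== VERDICT (by name: the statement is the Claim_ definition above) =====
theorem calculate_proximity_map_spec : Claim_equal_calculate_proximity_map := by
  intro bm _ _
  unfold Spec_calculate_proximity_map
  have hfuel : 5 * pvPsi bm (pvG0 bm) + (pvSources bm (pvRows bm) (pvCols bm)).length
      < 5 * (pvRows bm * pvCols bm) * (pvRows bm * pvCols bm) + pvRows bm * pvCols bm + 1 := by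
    have h1 := pvPsi_le bm (pvG0 bm)
    have h2 := len_pvSources bm
    have : 5 * pvPsi bm (pvG0 bm) ≤ 5 * (pvRows bm * pvCols bm * (pvRows bm * pvCols bm)) :=
      Nat.mul_le_mul_left 5 h1
    have e : 5 * (pvRows bm * pvCols bm) * (pvRows bm * pvCols bm)
        = 5 * (pvRows bm * pvCols bm * (pvRows bm * pvCols bm)) := by ring
    omega
  have hdone := pvLoop_done bm
    (5 * (pvRows bm * pvCols bm) * (pvRows bm * pvCols bm) + pvRows bm * pvCols bm + 1)
    (pvG0 bm) (pvSources bm (pvRows bm) (pvCols bm)) (pvInv_init bm) hfuel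
  simp only [calculate_proximity_map, calculate_proximity_map_alt]
  by_cases hS : pvSources bm (pvRows bm) (pvCols bm) = []
  · rw [hS]
    simp only [List.isEmpty_nil, if_true]
    apply List.map_congr_left
    intro r hr
    apply List.map_congr_left
    intro c hc
    rw [← hS]
    rw [pvNoSource bm _ hdone.2.1 hS ((r : Int), (c : Int))
      (by simp only [pvInB]
          have := List.mem_range.mp hr
          have := List.mem_range.mp hc
          constructor <;> omega)]
  · rw [show (pvSources bm (pvRows bm) (pvCols bm)).isEmpty = false by
      simpa [List.isEmpty_iff] using hS]
    simp only [Bool.false_eq_true, if_false]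
    apply List.map_congr_left
    intro r hr
    apply List.map_congr_left
    intro c hc
    exact pvEntry bm _ hdone hS r c (List.mem_range.mp hr) (List.mem_range.mp hc)
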